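-- pv_equiv track=rewrite | github.com/bobreddy2009/111 | PythonConcepts/unique.py | unique_letters
-- ===== SOURCE A (Python) =====
-- def unique_letters(string):
--     splitted = string.split()
--     for i in splitted:
--         sets = set(i)
--         final = list(sets)
--         final.sort()
--         check = []
--         for letter in i:
--             check.append(letter)
--         check.sort()
--         if final == check:
--             pass
--         else:
--             return False
--     return True
-- ===== SOURCE B (Python) =====
-- def unique_letters(string):
--     for word in string.split():
--         seen = set()
--         for ch in word:
--             if ch in seen:
--                 return False
--             seen.add(ch)
--     return True
-- ===== Notes on version B (the rewrite author's own statement) =====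
-- stated objective: simpler
-- what changed: Replaced A's per-word build-set, copy-to-list, sort-both-and-compare scheme with a single incremental scan per word that maintains a set of already-visited characters and returns False at the first repeat.
import Mathlib
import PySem

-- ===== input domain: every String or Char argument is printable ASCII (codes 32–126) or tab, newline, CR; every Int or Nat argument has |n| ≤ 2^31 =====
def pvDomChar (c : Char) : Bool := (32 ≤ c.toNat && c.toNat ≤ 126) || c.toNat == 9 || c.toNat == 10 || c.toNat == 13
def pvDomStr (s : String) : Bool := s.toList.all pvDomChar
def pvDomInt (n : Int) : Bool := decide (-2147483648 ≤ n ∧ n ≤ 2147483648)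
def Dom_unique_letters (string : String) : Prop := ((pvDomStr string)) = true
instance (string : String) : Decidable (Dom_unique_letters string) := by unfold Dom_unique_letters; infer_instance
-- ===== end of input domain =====

-- B replaces A's sort-set-and-compare per word with an early-exiting seen-set scan (simpler).

-- ===== PORT A =====
-- the loop over splitted words; early 'return False' becomes the false branch
def uniqueLettersLoopA : List String → Bool
  | [] => true
  | i :: rest =>
    let sets : PySem.Set Char := PySem.Set.ofList i.toList
    let final := PySem.List.sorted sets (fun x => x) false
    let check := i.toList.foldl (fun acc letter => acc ++ [letter]) ([] : List Char)
    let checkSorted := PySem.List.sorted check (fun x => x) false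
    if final == checkSorted then uniqueLettersLoopA rest else false

def unique_letters (string : String) : Bool :=
  uniqueLettersLoopA (PySem.Str.split₀ string)

-- ===== PORT B =====
-- inner scan with a growing 'seen' set; 'return False' on a repeat
def uniqueLettersScanB (seen : PySem.Set Char) : List Char → Bool
  | [] => true
  | c :: cs =>
    if PySem.Set.contains seen c then false
    else uniqueLettersScanB (PySem.Set.add seen c) cs

def uniqueLettersLoopB : List String → Bool
  | [] => true
  | w :: rest =>
    if uniqueLettersScanB PySem.Set.empty w.toList then uniqueLettersLoopB rest else false

def unique_letters_alt (string : String) : Bool :=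
  uniqueLettersLoopB (PySem.Str.split₀ string)

-- ===== PRECONDITION & SPEC =====
def Spec_unique_letters (string : String) (out : Bool) : Prop := out = unique_letters_alt string
instance (string : String) (out : Bool) : Decidable (Spec_unique_letters string out) := by unfold Spec_unique_letters; infer_instance

-- ===== CLAIM (what is proved, stated in full; the proofs are below) =====
def Claim_equal_unique_letters : Prop := ∀ (string : String), Dom_unique_letters string → Spec_unique_letters string (unique_letters string)

-- ===== LEMMAS AND PROOFS =====

theorem foldl_append_singleton (w : List Char) :
    ∀ acc : List Char, w.foldl (fun acc letter => acc ++ [letter]) acc = acc ++ w := by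
  induction w with
  | nil => simp
  | cons c cs ih => intro acc; simp [List.foldl, ih]

theorem wordA_eq_nodup (w : List Char) :
    ((PySem.List.sorted (PySem.Set.ofList w) (fun x => x) false ==
      PySem.List.sorted (w.foldl (fun acc letter => acc ++ [letter]) ([] : List Char)) (fun x => x) false))
      = decide w.Nodup := by
  rw [foldl_append_singleton w []]
  simp only [List.nil_append]
  rw [Bool.eq_iff_iff]
  simp only [beq_iff_eq, decide_eq_true_eq]
  rw [PySem.List.sorted_id_eq_sorted_id_iff_perm]
  constructor
  · intro h; exact h.nodup (PySem.Set.nodup_ofList w)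
  · intro h
    rw [PySem.Set.ofList_eq_self_of_nodup w h]

theorem scanB_eq (w : List Char) :
    ∀ seen : PySem.Set Char,
      uniqueLettersScanB seen w = decide (w.Nodup ∧ ∀ c ∈ w, c ∉ seen) := by
  induction w with
  | nil => intro seen; simp [uniqueLettersScanB]
  | cons c cs ih =>
    intro seen
    rw [uniqueLettersScanB]
    by_cases hc : PySem.Set.contains seen c = true
    · have : c ∈ seen := (PySem.Set.contains_iff seen c).1 hc
      simp [this]
    · have hcm : c ∉ seen := fun h => hc ((PySem.Set.contains_iff seen c).2 h)
      rw [if_neg hc, ih]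
      rw [Bool.eq_iff_iff]
      simp only [decide_eq_true_eq, List.nodup_cons, List.mem_cons]
      constructor
      · rintro ⟨hnd, hall⟩
        refine ⟨⟨fun hmem => ?_, hnd⟩, fun x hx hmem => ?_⟩
        · exact hall c hmem (by simp [PySem.Set.mem_add])
        · rcases hx with rfl | hx'
          · exact hcm hmem
          · have := hall x hx'
            rw [PySem.Set.mem_add] at this
            exact this (Or.inl hmem)
      · rintro ⟨⟨hcn, hnd⟩, hall⟩
        refine ⟨hnd, fun x hx hmem => ?_⟩
        rw [PySem.Set.mem_add] at hmem
        rcases hmem with hmem | heq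
        · exact hall x (Or.inr hx) hmem
        · exact hcn (heq ▸ hx)

theorem wordB_eq_nodup (w : List Char) :
    uniqueLettersScanB PySem.Set.empty w = decide w.Nodup := by
  rw [scanB_eq]
  simp [PySem.Set.empty]

theorem loops_eq (ws : List String) : uniqueLettersLoopA ws = uniqueLettersLoopB ws := by
  induction ws with
  | nil => rfl
  | cons w rest ih =>
    rw [uniqueLettersLoopA, uniqueLettersLoopB]
    simp only [wordA_eq_nodup w.toList, wordB_eq_nodup w.toList, ih]

-- ===== VERDICT (by name: the statement is the Claim_ definition above) =====
theorem unique_letters_spec : Claim_equal_unique_letters := by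
  intro s _
  unfold Spec_unique_letters unique_letters unique_letters_alt
  exact loops_eq _
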